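-- pv_equiv track=rewrite | github.com/girish-m-s/RAGO_RAGCache_LLM | rag_rago_cache_cuda.py | fake_context_builder
-- ===== SOURCE A (Python) =====
-- def fake_context_builder(doc_ids, token_budget):
--     # pretend each doc contributes ~45 tokens
--     room = token_budget
--     picked = []
--     for d in doc_ids:
--         if room < 45:
--             break
--         picked.append(int(d))
--         room -= 45
--     return picked
-- ===== SOURCE B (Python) =====
-- from itertools import islice
--
-- def fake_context_builder(doc_ids, token_budget):
--     # closed-form capacity: each doc costs 45 tokens
--     k = max(token_budget // 45, 0)
--     return [int(d) for d in islice(doc_ids, k)]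
-- ===== Notes on version B (the rewrite author's own statement) =====
-- stated objective: simpler
-- what changed: Replaces the room-accumulator loop with a closed-form capacity count k = max(token_budget // 45, 0) followed by a prefix take via islice.
import Mathlib
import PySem

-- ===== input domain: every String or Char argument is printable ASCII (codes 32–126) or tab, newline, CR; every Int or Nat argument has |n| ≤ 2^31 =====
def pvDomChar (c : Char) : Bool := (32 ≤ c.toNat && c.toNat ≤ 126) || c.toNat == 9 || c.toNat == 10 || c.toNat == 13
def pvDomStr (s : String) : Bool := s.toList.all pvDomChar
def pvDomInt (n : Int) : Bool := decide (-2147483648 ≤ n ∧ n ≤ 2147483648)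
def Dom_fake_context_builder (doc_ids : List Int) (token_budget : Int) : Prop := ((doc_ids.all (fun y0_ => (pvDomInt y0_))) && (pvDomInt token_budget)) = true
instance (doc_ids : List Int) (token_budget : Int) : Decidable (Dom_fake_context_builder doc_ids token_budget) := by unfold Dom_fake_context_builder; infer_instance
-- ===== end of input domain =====

-- ===== PORT A =====
-- loop: 'for d in doc_ids: if room < 45: break; picked.append(int(d)); room -= 45'
def fcbLoop : List Int → Int → List Int
  | [], _ => []
  | d :: rest, room => if room < 45 then [] else d :: fcbLoop rest (room - 45)

def fake_context_builder (doc_ids : List Int) (token_budget : Int) : List Int :=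
  fcbLoop doc_ids token_budget

-- ===== PORT B =====
-- B: k = max(token_budget // 45, 0); take the leading k ids
def fake_context_builder_alt (doc_ids : List Int) (token_budget : Int) : List Int :=
  doc_ids.take (max (PySem.Int.floordiv token_budget 45) 0).toNat

-- ===== PRECONDITION & SPEC =====
def Spec_fake_context_builder (doc_ids : List Int) (token_budget : Int) (out : List Int) : Prop := out = fake_context_builder_alt doc_ids token_budget
instance (doc_ids : List Int) (token_budget : Int) (out : List Int) : Decidable (Spec_fake_context_builder doc_ids token_budget out) := by unfold Spec_fake_context_builder; infer_instance

-- ===== CLAIM (what is proved, stated in full; the proofs are below) =====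
def Claim_equal_fake_context_builder : Prop := ∀ (doc_ids : List Int) (token_budget : Int), Dom_fake_context_builder doc_ids token_budget → Spec_fake_context_builder doc_ids token_budget (fake_context_builder doc_ids token_budget)

-- ===== LEMMAS AND PROOFS =====

-- ===== VERDICT (by name: the statement is the Claim_ definition above) =====
theorem fcbLoop_eq_take (l : List Int) (room : Int) :
    fcbLoop l room = l.take (max (PySem.Int.floordiv room 45) 0).toNat := by
  induction l generalizing room with
  | nil => simp [fcbLoop]
  | cons d rest ih =>
    have h45 : (0:Int) < 45 := by norm_num
    rw [PySem.Int.floordiv_eq_ediv_of_pos h45] at *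
    by_cases h : room < 45
    · have hz : (max (room / 45) 0).toNat = 0 := by omega
      simp [fcbLoop, h, hz]
    · have h1 : 1 ≤ room / 45 := by omega
      have h2 : (room - 45) / 45 = room / 45 - 1 := by omega
      rw [fcbLoop, if_neg h, ih, PySem.Int.floordiv_eq_ediv_of_pos h45, h2]
      have : (max (room / 45) 0).toNat = ((max (room / 45 - 1) 0).toNat) + 1 := by omega
      rw [this, List.take_succ_cons]

theorem fake_context_builder_spec : Claim_equal_fake_context_builder := by
  intro doc_ids token_budget _
  unfold Spec_fake_context_builder fake_context_builder fake_context_builder_alt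
  exact fcbLoop_eq_take doc_ids token_budget
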